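-- pv_equiv track=rewrite | github.com/Aksh4y2604/AOC-2023 | d2.py | is_valid_game
-- ===== SOURCE A (Python) =====
-- def is_valid_game(game_data):
--     for game in game_data:
--         if game[0] > 12:
--             return False
--         if game[1] > 14:
--             return False
--         if game[2] > 13:
--             return False
--     return True
-- ===== SOURCE B (Python) =====
-- def is_valid_game(game_data):
--     if not game_data:
--         return True
--     return (max(g[0] for g in game_data) <= 12
--             and max(g[1] for g in game_data) <= 14
--             and max(g[2] for g in game_data) <= 13)
-- ===== Notes on version B (the rewrite author's own statement) =====
-- stated objective: alternative
-- what changed: Replaces A's per-row short-circuit scan with three column-wise max reductions and one final comparison against the limits.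
import Mathlib
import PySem

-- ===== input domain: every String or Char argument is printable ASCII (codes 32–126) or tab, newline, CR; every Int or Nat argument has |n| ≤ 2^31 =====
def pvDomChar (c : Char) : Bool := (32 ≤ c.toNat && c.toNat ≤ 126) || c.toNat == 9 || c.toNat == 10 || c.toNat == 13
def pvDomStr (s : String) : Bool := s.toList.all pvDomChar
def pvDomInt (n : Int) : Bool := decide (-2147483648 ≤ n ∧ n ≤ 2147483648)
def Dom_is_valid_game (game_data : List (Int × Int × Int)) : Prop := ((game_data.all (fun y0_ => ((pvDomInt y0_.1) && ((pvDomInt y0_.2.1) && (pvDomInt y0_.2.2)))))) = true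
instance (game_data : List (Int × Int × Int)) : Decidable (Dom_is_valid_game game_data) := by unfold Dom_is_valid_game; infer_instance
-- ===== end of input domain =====

-- B replaces A's per-row short-circuit scan with three column-wise max reductions compared once against the limits (alternative decomposition, same O(n) cost).


-- ===== PORT A =====
-- A loops over the rows, returning False at the first limit violation, True at the end.
def is_valid_game (game_data : List (Int × Int × Int)) : Bool :=
  match game_data with
  | [] => true
  | g :: rest =>
    if g.1 > 12 then false
    else if g.2.1 > 14 then false
    else if g.2.2 > 13 then false
    else is_valid_game rest

-- ===== PORT B =====
-- max(...) over a nonempty list, as Python's max: fold of binary max over the tail starting at the head.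
def pyMaxNE (x : Int) (xs : List Int) : Int := xs.foldl max x

def is_valid_game_alt (game_data : List (Int × Int × Int)) : Bool :=
  match game_data with
  | [] => true
  | g :: rest =>
    decide (pyMaxNE g.1 (rest.map (·.1)) ≤ 12) &&
    decide (pyMaxNE g.2.1 (rest.map (·.2.1)) ≤ 14) &&
    decide (pyMaxNE g.2.2 (rest.map (·.2.2)) ≤ 13)

-- ===== PRECONDITION & SPEC =====
def Spec_is_valid_game (game_data : List (Int × Int × Int)) (out : Bool) : Prop := out = is_valid_game_alt game_data
instance (game_data : List (Int × Int × Int)) (out : Bool) : Decidable (Spec_is_valid_game game_data out) := by unfold Spec_is_valid_game; infer_instance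

-- ===== CLAIM (what is proved, stated in full; the proofs are below) =====
def Claim_equal_is_valid_game : Prop := ∀ (game_data : List (Int × Int × Int)), Dom_is_valid_game game_data → Spec_is_valid_game game_data (is_valid_game game_data)

-- ===== LEMMAS AND PROOFS =====

theorem foldl_max_le_iff (c : Int) (xs : List Int) (a : Int) :
    (xs.foldl max a ≤ c) ↔ (a ≤ c ∧ ∀ y ∈ xs, y ≤ c) := by
  induction xs generalizing a with
  | nil => simp
  | cons x xs ih =>
    simp only [List.foldl_cons, ih, max_le_iff, List.mem_cons]
    constructor
    · rintro ⟨⟨ha, hx⟩, h⟩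
      exact ⟨ha, fun y hy => hy.elim (fun e => e ▸ hx) (h y)⟩
    · rintro ⟨ha, h⟩
      exact ⟨⟨ha, h x (Or.inl rfl)⟩, fun y hy => h y (Or.inr hy)⟩

theorem alt_eq_all (l : List (Int × Int × Int)) :
    is_valid_game_alt l = l.all (fun g => decide (g.1 ≤ 12 ∧ g.2.1 ≤ 14 ∧ g.2.2 ≤ 13)) := by
  cases l with
  | nil => rfl
  | cons g rest =>
    simp only [is_valid_game_alt, pyMaxNE, List.all_cons]
    rw [Bool.eq_iff_iff]
    simp only [Bool.and_eq_true, decide_eq_true_eq, foldl_max_le_iff, List.all_eq_true,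
      List.mem_map, forall_exists_index, and_imp]
    constructor
    · rintro ⟨⟨⟨h1, m1⟩, h2, m2⟩, h3, m3⟩
      exact ⟨⟨h1, h2, h3⟩, fun p hp => ⟨m1 _ _ hp rfl, m2 _ _ hp rfl, m3 _ _ hp rfl⟩⟩
    · rintro ⟨⟨h1, h2, h3⟩, hall⟩
      refine ⟨⟨⟨h1, ?_⟩, h2, ?_⟩, h3, ?_⟩ <;> intro y p hp e
      · exact e ▸ (hall p hp).1
      · exact e ▸ (hall p hp).2.1
      · exact e ▸ (hall p hp).2.2

theorem a_eq_all (l : List (Int × Int × Int)) :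
    is_valid_game l = l.all (fun g => decide (g.1 ≤ 12 ∧ g.2.1 ≤ 14 ∧ g.2.2 ≤ 13)) := by
  induction l with
  | nil => rfl
  | cons g rest ih =>
    simp only [is_valid_game, ih, List.all_cons]
    split_ifs with h1 h2 h3 <;> simp <;> omega

-- ===== VERDICT (by name: the statement is the Claim_ definition above) =====
theorem is_valid_game_spec : Claim_equal_is_valid_game := by
  intro game_data _
  unfold Spec_is_valid_game
  rw [a_eq_all, alt_eq_all]
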